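-- pv_equiv track=rewrite | github.com/Muattarxon27/pythonhomeworks | lesson-3/homework/list.py | subroyxat_bormi
-- ===== SOURCE A (Python) =====
-- def subroyxat_bormi(royxat, subroyxat):
--     n, m = len(royxat), len(subroyxat)
--
--     # Agar subro‘yxat uzunligi asosiy ro‘yxatdan katta bo‘lsa, mavjud emas
--     if m > n:
--         return False
--
--     # Har bir indeksdan boshlab subro‘yxatni tekshiramiz
--     for i in range(n - m + 1):
--         if royxat[i:i + m] == subroyxat:
--             return True  # Agar mos keladigan qism topilsa, True qaytariladi
--
--     return False  # Agar hech qanday moslik topilmasa, False qaytariladi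
-- ===== SOURCE B (Python) =====
-- def subroyxat_bormi(royxat, subroyxat):
--     # Scan the suffixes of royxat, comparing element-wise with early exit;
--     # the empty sublist is trivially contained.
--     if not subroyxat:
--         return True
--     tail = royxat
--     while len(tail) >= len(subroyxat):
--         if all(a == b for a, b in zip(tail, subroyxat)):
--             return True
--         tail = tail[1:]
--     return False
-- ===== Notes on version B (the rewrite author's own statement) =====
-- stated objective: alternative
-- what changed: Replaces the index loop that materialises and compares a fresh slice royxat[i:i+m] at every position by a suffix walk that compares element-wise via zip with early exit on the first mismatch, handling the empty pattern up front.
import Mathlib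
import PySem

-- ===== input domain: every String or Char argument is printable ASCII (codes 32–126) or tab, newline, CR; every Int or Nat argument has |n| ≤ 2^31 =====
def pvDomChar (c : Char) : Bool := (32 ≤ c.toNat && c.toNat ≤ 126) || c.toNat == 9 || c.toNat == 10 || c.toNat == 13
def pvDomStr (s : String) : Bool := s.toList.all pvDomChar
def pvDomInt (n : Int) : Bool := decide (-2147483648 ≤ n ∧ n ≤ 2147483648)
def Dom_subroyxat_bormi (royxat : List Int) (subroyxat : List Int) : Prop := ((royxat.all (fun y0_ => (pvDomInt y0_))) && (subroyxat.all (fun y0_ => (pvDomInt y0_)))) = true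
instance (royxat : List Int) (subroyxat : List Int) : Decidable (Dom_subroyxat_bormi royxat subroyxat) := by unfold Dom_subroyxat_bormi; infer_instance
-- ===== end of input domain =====

-- B replaces A's index loop over slices by a suffix walk with element-wise zip comparison (alternative decomposition, same asymptotic cost).


-- ===== PORT A =====
def subroyxat_bormi (royxat : List Int) (subroyxat : List Int) : Bool :=
  let n := royxat.length
  let m := subroyxat.length
  if m > n then false
  else
    -- for i in range(n - m + 1): if royxat[i:i+m] == subroyxat: return True
    (List.range (n - m + 1)).any (fun i =>
      PySem.List.slice royxat (some (i : Int)) (some ((i : Int) + (m : Int))) == subroyxat)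

-- ===== PORT B =====
-- all(a == b for a, b in zip(tail, subroyxat))
def pvZipEq (xs : List Int) (ys : List Int) : Bool :=
  (xs.zip ys).all (fun p => p.1 == p.2)

-- the 'while len(tail) >= len(subroyxat)' loop, tail shrinking by one each round
def pvSuffixLoop (sub : List Int) : List Int → Bool
  | [] => false
  | x :: t =>
    if sub.length ≤ (x :: t).length then
      (if pvZipEq (x :: t) sub then true else pvSuffixLoop sub t)
    else false

def subroyxat_bormi_alt (royxat : List Int) (subroyxat : List Int) : Bool :=
  if subroyxat.isEmpty then true else pvSuffixLoop subroyxat royxat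

-- ===== PRECONDITION & SPEC =====
def Spec_subroyxat_bormi (royxat : List Int) (subroyxat : List Int) (out : Bool) : Prop := out = subroyxat_bormi_alt royxat subroyxat
instance (royxat : List Int) (subroyxat : List Int) (out : Bool) : Decidable (Spec_subroyxat_bormi royxat subroyxat out) := by unfold Spec_subroyxat_bormi; infer_instance

-- ===== CLAIM (what is proved, stated in full; the proofs are below) =====
def Claim_equal_subroyxat_bormi : Prop := ∀ (royxat : List Int) (subroyxat : List Int), Dom_subroyxat_bormi royxat subroyxat → Spec_subroyxat_bormi royxat subroyxat (subroyxat_bormi royxat subroyxat)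

-- ===== LEMMAS AND PROOFS =====

theorem pvZipEq_iff_prefix (ys : List Int) :
    ∀ (xs : List Int), ys.length ≤ xs.length → (pvZipEq xs ys = true ↔ ys <+: xs) := by
  induction ys with
  | nil => intro xs _; simp [pvZipEq]
  | cons y ys ih =>
    intro xs hlen
    cases xs with
    | nil => simp at hlen
    | cons x xs =>
      simp only [List.length_cons, Nat.add_le_add_iff_right] at hlen
      simp only [pvZipEq, List.zip_cons_cons, List.all_cons, Bool.and_eq_true, beq_iff_eq,
        List.cons_prefix_cons]
      constructor
      · rintro ⟨h1, h2⟩; exact ⟨h1.symm, (ih xs hlen).1 h2⟩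
      · rintro ⟨h1, h2⟩; exact ⟨h1.symm, (ih xs hlen).2 h2⟩

theorem pvSuffixLoop_iff (sub : List Int) (hsub : sub ≠ []) :
    ∀ (tail : List Int), (pvSuffixLoop sub tail = true ↔ sub <:+: tail) := by
  intro tail
  induction tail with
  | nil =>
    simp only [pvSuffixLoop]
    exact iff_of_false (by simp) (fun h => hsub (List.eq_nil_of_infix_nil h))
  | cons x t ih =>
    simp only [pvSuffixLoop]
    by_cases hlen : sub.length ≤ (x :: t).length
    · simp only [if_pos hlen]
      rw [List.infix_cons_iff]
      by_cases hz : pvZipEq (x :: t) sub = true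
      · rw [hz, if_pos rfl]
        exact iff_of_true rfl (Or.inl ((pvZipEq_iff_prefix sub (x :: t) hlen).1 hz))
      · rw [if_neg (by simp [hz]), ih]
        constructor
        · exact Or.inr
        · rintro (hp | hi)
          · exact absurd ((pvZipEq_iff_prefix sub (x :: t) hlen).2 hp) hz
          · exact hi
    · rw [if_neg hlen]
      exact iff_of_false (by simp) (fun h => hlen h.length_le)

theorem portB_iff (royxat subroyxat : List Int) :
    subroyxat_bormi_alt royxat subroyxat = true ↔ subroyxat <:+: royxat := by
  unfold subroyxat_bormi_alt
  by_cases h : subroyxat = []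
  · subst h; simp
  · rw [if_neg (by simpa using h)]
    exact pvSuffixLoop_iff subroyxat h royxat

theorem portA_iff (royxat subroyxat : List Int) :
    subroyxat_bormi royxat subroyxat = true ↔ subroyxat <:+: royxat := by
  unfold subroyxat_bormi
  by_cases hmn : subroyxat.length > royxat.length
  · rw [if_pos hmn]
    exact iff_of_false (by simp) (fun h => absurd h.length_le (by omega))
  · rw [if_neg hmn]
    rw [Nat.not_lt] at hmn
    simp only [List.any_eq_true, List.mem_range, beq_iff_eq,
      PySem.List.slice_natCast_add]
    constructor
    · rintro ⟨i, _, hslice⟩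
      obtain ⟨t, ht⟩ : subroyxat <+: royxat.drop i := hslice ▸ List.take_prefix _ _
      exact ⟨royxat.take i, t, by rw [List.append_assoc, ht, List.take_append_drop]⟩
    · rintro ⟨s, t, habc⟩
      refine ⟨s.length, ?_, ?_⟩
      · have : royxat.length = s.length + subroyxat.length + t.length := by
          rw [← habc]; simp; omega
        omega
      · have hdrop : royxat.drop s.length = subroyxat ++ t := by
          rw [← habc, List.append_assoc, List.drop_left]
        rw [hdrop, List.take_left' rfl]

-- ===== VERDICT (by name: the statement is the Claim_ definition above) =====
theorem subroyxat_bormi_spec : Claim_equal_subroyxat_bormi := by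
  intro royxat subroyxat _
  unfold Spec_subroyxat_bormi
  rw [Bool.eq_iff_iff, portA_iff, portB_iff]
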